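-- pv_equiv track=rewrite | github.com/hjlim7831/algorithm | 프로그래머스/lv1/42840. 모의고사/모의고사.py | solution
-- ===== SOURCE A (Python) =====
-- def solution(answers):
--     patterns = []
--     patterns.append([1,2,3,4,5])
--     patterns.append([2,1,2,3,2,4,2,5])
--     patterns.append([3,3,1,1,2,2,4,4,5,5])
--
--     result = []
--
--     for i in range(3):
--         pattern = patterns[i]
--         p_len = len(pattern)
--         score = 0
--         for j in range(len(answers)):
--             answer = answers[j]
--             guess = pattern[j % p_len]
--             if answer == guess:
--                 score += 1
--         result.append((score, i + 1))
--     result.sort(key=lambda x:x[0], reverse=True)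
--
--     most = []
--     most.append(result[0][1])
--     for i in range(1, 3):
--         if result[i][0] == result[0][0]:
--             most.append(result[i][1])
--
--     return most
-- ===== SOURCE B (Python) =====
-- def solution(answers):
--     patterns = [[1, 2, 3, 4, 5],
--                 [2, 1, 2, 3, 2, 4, 2, 5],
--                 [3, 3, 1, 1, 2, 2, 4, 4, 5, 5]]
--     # Histogram: bucket answers by (position mod 40, value); 40 = lcm of the
--     # three pattern lengths, so each pattern is constant on a residue class.
--     cnt = {}
--     for i, a in enumerate(answers):
--         key = (i % 40, a)
--         cnt[key] = cnt.get(key, 0) + 1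
--     scores = [sum(cnt.get((r, p[r % len(p)]), 0) for r in range(40))
--               for p in patterns]
--     best = max(scores)
--     return [k for k, s in enumerate(scores, 1) if s == best]
-- ===== Notes on version B (the rewrite author's own statement) =====
-- stated objective: alternative
-- what changed: B replaces A's three direct compare-every-answer loops plus sort-then-collect by a histogram algorithm: one pass buckets the answers by (index mod 40, value) in a dict (40 = lcm of the pattern lengths), each score is then read off as 40 dict lookups, and the winners are collected by max-then-filter instead of sorting.
import Mathlib
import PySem

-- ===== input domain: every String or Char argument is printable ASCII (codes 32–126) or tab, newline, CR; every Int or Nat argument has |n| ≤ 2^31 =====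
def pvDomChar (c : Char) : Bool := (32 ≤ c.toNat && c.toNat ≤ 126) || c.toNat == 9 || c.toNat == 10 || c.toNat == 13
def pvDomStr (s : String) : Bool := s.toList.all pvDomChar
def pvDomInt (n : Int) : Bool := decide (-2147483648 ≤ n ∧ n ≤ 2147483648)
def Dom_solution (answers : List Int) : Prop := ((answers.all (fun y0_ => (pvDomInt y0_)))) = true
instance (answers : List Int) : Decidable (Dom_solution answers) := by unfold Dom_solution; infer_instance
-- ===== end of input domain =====

-- B replaces A's per-pattern compare loops and sort-then-collect by a histogram keyed by
-- (index mod 40, value) built in one pass, 40 lookups per score, and max-then-filter; objective: alternative.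

-- ===== PORT A =====
def solution (answers : List Int) : List Int :=
  let patterns : List (List Int) := [[1,2,3,4,5], [2,1,2,3,2,4,2,5], [3,3,1,1,2,2,4,4,5,5]]
  let result : List (Int × Int) := (PySem.List.pyRange 0 3 1).foldl (fun res i =>
    let pattern := PySem.List.pyGetD patterns i []
    let p_len : Int := pattern.length
    let score : Int := (PySem.List.pyRange 0 (answers.length : Int) 1).foldl (fun score j =>
      let answer := PySem.List.pyGetD answers j 0
      let guess := PySem.List.pyGetD pattern (PySem.Int.mod j p_len) 0
      if answer == guess then score + 1 else score) 0
    res ++ [(score, i + 1)]) []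
  let sortedRes := PySem.List.sorted result (fun x => x.1) true
  let first := PySem.List.pyGetD sortedRes 0 (0, 0)
  (PySem.List.pyRange 1 3 1).foldl (fun most i =>
    let ri := PySem.List.pyGetD sortedRes i (0, 0)
    if ri.1 == first.1 then most ++ [ri.2] else most) [first.2]

-- ===== PORT B =====
def solution_alt (answers : List Int) : List Int :=
  let patterns : List (List Int) := [[1,2,3,4,5], [2,1,2,3,2,4,2,5], [3,3,1,1,2,2,4,4,5,5]]
  let cnt : PySem.Dict (Int × Int) Int := (PySem.List.enumerate answers).foldl
    (fun d ia => d.insert (PySem.Int.mod ia.1 40, ia.2) (d.getD (PySem.Int.mod ia.1 40, ia.2) 0 + 1))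
    PySem.Dict.empty
  let scores : List Int := patterns.map (fun p =>
    (PySem.List.pyRange 0 40 1).foldl (fun s r =>
      s + cnt.getD (r, PySem.List.pyGetD p (PySem.Int.mod r (p.length : Int)) 0) 0) 0)
  let best := (PySem.List.max? scores (fun x => x)).getD 0
  ((PySem.List.enumerate scores 1).filter (fun ks => ks.2 == best)).map (·.1)

-- ===== PRECONDITION & SPEC =====
def Spec_solution (answers : List Int) (out : List Int) : Prop := out = solution_alt answers
instance (answers : List Int) (out : List Int) : Decidable (Spec_solution answers out) := by unfold Spec_solution; infer_instance

-- ===== CLAIM (what is proved, stated in full; the proofs are below) =====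
def Claim_equal_solution : Prop := ∀ (answers : List Int), Dom_solution answers → Spec_solution answers (solution answers)

-- ===== LEMMAS AND PROOFS =====

-- A's tail phase: sort the three (score, pattern-number) pairs descending, collect all with top score.
def pvTailA (s1 s2 s3 : Int) : List Int :=
  let sortedRes := PySem.List.sorted [(s1,1),(s2,2),(s3,3)] (fun x => x.1) true
  let first := PySem.List.pyGetD sortedRes 0 (0, 0)
  (PySem.List.pyRange 1 3 1).foldl (fun most i =>
    let ri := PySem.List.pyGetD sortedRes i (0, 0)
    if ri.1 == first.1 then most ++ [ri.2] else most) [first.2]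

-- B's tail phase: max of the three scores, then filter pattern numbers 1,2,3.
def pvTailB (s1 s2 s3 : Int) : List Int :=
  ((PySem.List.enumerate [s1, s2, s3] 1).filter
    (fun ks => ks.2 == (PySem.List.max? [s1, s2, s3] (fun x => x)).getD 0)).map (·.1)

-- A's per-pattern score loop (over indices of answers).
def pvScoreA (pat : List Int) (answers : List Int) : Int :=
  (PySem.List.pyRange 0 (answers.length : Int) 1).foldl (fun score j =>
    let answer := PySem.List.pyGetD answers j 0
    let guess := PySem.List.pyGetD pat (PySem.Int.mod j (pat.length : Int)) 0
    if answer == guess then score + 1 else score) 0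

-- B's histogram of answers bucketed by (index mod 40, value).
def pvHist (answers : List Int) : PySem.Dict (Int × Int) Int :=
  (PySem.List.enumerate answers).foldl
    (fun d ia => d.insert (PySem.Int.mod ia.1 40, ia.2) (d.getD (PySem.Int.mod ia.1 40, ia.2) 0 + 1))
    PySem.Dict.empty

-- B's score of pattern p read off the histogram.
def pvHScore (cnt : PySem.Dict (Int × Int) Int) (p : List Int) : Int :=
  (PySem.List.pyRange 0 40 1).foldl (fun s r =>
    s + cnt.getD (r, PySem.List.pyGetD p (PySem.Int.mod r (p.length : Int)) 0) 0) 0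

lemma pvMax3 (s1 s2 s3 : Int) :
    (PySem.List.max? [s1, s2, s3] (fun x => x)).getD 0 = max s1 (max s2 s3) := by
  rw [PySem.List.max?_id_cons]
  simp [max_assoc]

lemma pvSum_insert (d : PySem.Dict (Int × Int) Int) (g : Int → Int) (m a : Int)
    (rs : List Int) (h : rs.Nodup) :
    (rs.map (fun r => (d.insert (m, a) (d.getD (m, a) 0 + 1)).getD (r, g r) 0)).sum
      = (rs.map (fun r => d.getD (r, g r) 0)).sum + (if m ∈ rs ∧ g m = a then 1 else 0) := by
  induction rs with
  | nil => simp
  | cons r rs ih =>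
    simp only [List.nodup_cons] at h
    obtain ⟨hm, hnd⟩ := h
    simp only [List.map_cons, List.sum_cons]
    rw [ih hnd, PySem.Dict.getD_insert]
    by_cases hr : ((r, g r) : Int × Int) = (m, a)
    · have h1 : r = m := congrArg Prod.fst hr
      have h2 : g r = a := congrArg Prod.snd hr
      subst h1
      rw [if_pos hr, if_neg (fun hc => hm hc.1),
        if_pos (⟨List.mem_cons_self .., h2⟩ : r ∈ r :: rs ∧ g r = a), h2]
      ring
    · rw [if_neg hr]
      have hiff : (m ∈ r :: rs ∧ g m = a) ↔ (m ∈ rs ∧ g m = a) := by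
        by_cases hmr : m = r
        · subst hmr
          have hga : g m ≠ a := fun hc => hr (by rw [hc])
          simp [hga]
        · simp [List.mem_cons, hmr]
      rw [if_congr hiff rfl rfl]
      ring

lemma pvHist_sum (answers : List Int) (g : Int → Int) :
    ((PySem.List.pyRange 0 40 1).map (fun r => (pvHist answers).getD (r, g r) 0)).sum
      = ((PySem.List.enumerate answers).countP
          (fun ia => ia.2 == g (PySem.Int.mod ia.1 40)) : Int) := by
  induction answers using List.reverseRecOn with
  | nil => simp [pvHist, PySem.List.enumerate_nil, PySem.Dict.getD_empty]
  | append_singleton xs a ih =>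
    have hh : pvHist (xs ++ [a])
        = (pvHist xs).insert (PySem.Int.mod (xs.length : Int) 40, a)
            ((pvHist xs).getD (PySem.Int.mod (xs.length : Int) 40, a) 0 + 1) := by
      unfold pvHist
      rw [PySem.List.enumerate_append, List.foldl_append]
      simp [PySem.List.enumerate_cons, PySem.List.enumerate_nil]
    rw [hh, pvSum_insert _ g _ _ _ (PySem.List.nodup_pyRange_one 0 40), ih,
      PySem.List.enumerate_append]
    simp only [List.countP_append, PySem.List.enumerate_cons, PySem.List.enumerate_nil,
      List.countP_cons, List.countP_nil]
    have hmem : PySem.Int.mod (xs.length : Int) 40 ∈ PySem.List.pyRange 0 40 1 := by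
      rw [PySem.List.mem_pyRange_one, PySem.Int.mod_eq_emod_of_pos (by norm_num : (0:Int) < 40)]
      constructor
      · exact Int.emod_nonneg _ (by norm_num)
      · exact Int.emod_lt_of_pos _ (by norm_num)
    have hz : ((0 : Int) + (xs.length : Int)) = (xs.length : Int) := by ring
    rw [hz]
    by_cases hc : g (PySem.Int.mod (xs.length : Int) 40) = a
    · rw [if_pos ⟨hmem, hc⟩]
      have hb : (a == g (PySem.Int.mod (xs.length : Int) 40)) = true := by
        rw [beq_iff_eq, hc]
      rw [hb]
      simp [add_comm]
    · rw [if_neg (fun h => hc h.2)]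
      have hb : (a == g (PySem.Int.mod (xs.length : Int) 40)) = false := by
        rw [beq_eq_false_iff_ne]
        exact fun h => hc h.symm
      rw [hb]
      simp [add_comm]

lemma pvScoreA_countP (pat answers : List Int) :
    pvScoreA pat answers
      = ((PySem.List.enumerate answers).countP
          (fun ia => ia.2 == PySem.List.pyGetD pat (PySem.Int.mod ia.1 (pat.length : Int)) 0) : Int) := by
  unfold pvScoreA
  rw [PySem.List.enumerate_eq_map_pyRange answers 0, List.countP_map,
    PySem.List.foldl_if_add_one
      (fun j => PySem.List.pyGetD answers j 0 == PySem.List.pyGetD pat (PySem.Int.mod j (pat.length : Int)) 0)]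
  simp [Function.comp_def]

lemma pvHScore_eq (answers p : List Int) (hdvd : (p.length : Int) ∣ 40)
    (hpos : 0 < (p.length : Int)) :
    pvHScore (pvHist answers) p = pvScoreA p answers := by
  unfold pvHScore
  rw [PySem.List.foldl_add _ (fun r => (pvHist answers).getD (r, PySem.List.pyGetD p (PySem.Int.mod r (p.length : Int)) 0) 0) 0,
    pvHist_sum answers (fun r => PySem.List.pyGetD p (PySem.Int.mod r (p.length : Int)) 0),
    pvScoreA_countP]
  have hcong : List.countP
        (fun ia => ia.2 == PySem.List.pyGetD p (PySem.Int.mod (PySem.Int.mod ia.1 40) (p.length : Int)) 0)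
        (PySem.List.enumerate answers)
      = List.countP
        (fun ia => ia.2 == PySem.List.pyGetD p (PySem.Int.mod ia.1 (p.length : Int)) 0)
        (PySem.List.enumerate answers) := by
    apply List.countP_congr
    intro ia _
    have h40 : PySem.Int.mod (PySem.Int.mod ia.1 40) (p.length : Int)
        = PySem.Int.mod ia.1 (p.length : Int) := by
      rw [PySem.Int.mod_eq_emod_of_pos (by norm_num : (0:Int) < 40),
        PySem.Int.mod_eq_emod_of_pos hpos, PySem.Int.mod_eq_emod_of_pos hpos,
        Int.emod_emod_of_dvd _ hdvd]
    rw [h40]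
  rw [hcong]
  ring

lemma pvSolutionA (answers : List Int) :
    solution answers
      = pvTailA (pvScoreA [1,2,3,4,5] answers) (pvScoreA [2,1,2,3,2,4,2,5] answers)
          (pvScoreA [3,3,1,1,2,2,4,4,5,5] answers) := rfl

lemma pvSolutionB (answers : List Int) :
    solution_alt answers
      = pvTailB (pvHScore (pvHist answers) [1,2,3,4,5])
          (pvHScore (pvHist answers) [2,1,2,3,2,4,2,5])
          (pvHScore (pvHist answers) [3,3,1,1,2,2,4,4,5,5]) := rfl

set_option maxHeartbeats 2000000 in
lemma pvTail_eq (s1 s2 s3 : Int) : pvTailA s1 s2 s3 = pvTailB s1 s2 s3 := by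
  unfold pvTailA pvTailB
  rw [pvMax3]
  have hr : PySem.List.pyRange 1 3 1 = [1, 2] := by decide
  by_cases c1 : s1 < s2
  · by_cases c2 : s2 < s3
    · have hs : PySem.List.sorted [(s1,(1:Int)),(s2,2),(s3,3)] (fun x => x.1) true
          = [(s3,3),(s2,2),(s1,1)] := by
        simp only [PySem.List.sorted, PySem.List.insertBy, List.foldl]
        split_ifs <;> simp only [PySem.List.insertBy] <;> try split_ifs
        all_goals try simp_all
      simp only [hs, hr]; clear hs
      simp [PySem.List.pyGetD, PySem.List.pyGet?, PySem.List.pyIdx?, List.foldl,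
        PySem.List.enumerate, List.filter_cons, beq_iff_eq, max_def]
      split_ifs <;> simp [List.map] <;> omega
    · by_cases c3 : s1 < s3
      · have hs : PySem.List.sorted [(s1,(1:Int)),(s2,2),(s3,3)] (fun x => x.1) true
            = [(s2,2),(s3,3),(s1,1)] := by
          simp only [PySem.List.sorted, PySem.List.insertBy, List.foldl]
          split_ifs <;> simp only [PySem.List.insertBy] <;> try split_ifs
          all_goals try simp_all
          all_goals omega
        simp only [hs, hr]; clear hs
        simp [PySem.List.pyGetD, PySem.List.pyGet?, PySem.List.pyIdx?, List.foldl,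
          PySem.List.enumerate, List.filter_cons, beq_iff_eq, max_def]
        split_ifs <;> simp [List.map] <;> omega
      · have hs : PySem.List.sorted [(s1,(1:Int)),(s2,2),(s3,3)] (fun x => x.1) true
            = [(s2,2),(s1,1),(s3,3)] := by
          simp only [PySem.List.sorted, PySem.List.insertBy, List.foldl]
          split_ifs <;> simp only [PySem.List.insertBy] <;> try split_ifs
          all_goals try simp_all
          all_goals omega
        simp only [hs, hr]; clear hs
        simp [PySem.List.pyGetD, PySem.List.pyGet?, PySem.List.pyIdx?, List.foldl,
          PySem.List.enumerate, List.filter_cons, beq_iff_eq, max_def]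
        split_ifs <;> simp [List.map] <;> omega
  · by_cases c2 : s1 < s3
    · have hs : PySem.List.sorted [(s1,(1:Int)),(s2,2),(s3,3)] (fun x => x.1) true
          = [(s3,3),(s1,1),(s2,2)] := by
        simp only [PySem.List.sorted, PySem.List.insertBy, List.foldl]
        split_ifs <;> simp only [PySem.List.insertBy] <;> try split_ifs
        all_goals try simp_all
        all_goals omega
      simp only [hs, hr]; clear hs
      simp [PySem.List.pyGetD, PySem.List.pyGet?, PySem.List.pyIdx?, List.foldl,
        PySem.List.enumerate, List.filter_cons, beq_iff_eq, max_def]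
      split_ifs <;> simp [List.map] <;> omega
    · by_cases c3 : s2 < s3
      · have hs : PySem.List.sorted [(s1,(1:Int)),(s2,2),(s3,3)] (fun x => x.1) true
            = [(s1,1),(s3,3),(s2,2)] := by
          simp only [PySem.List.sorted, PySem.List.insertBy, List.foldl]
          split_ifs <;> simp only [PySem.List.insertBy] <;> try split_ifs
          all_goals try simp_all
          all_goals omega
        simp only [hs, hr]; clear hs
        simp [PySem.List.pyGetD, PySem.List.pyGet?, PySem.List.pyIdx?, List.foldl,
          PySem.List.enumerate, List.filter_cons, beq_iff_eq, max_def]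
        split_ifs <;> simp [List.map] <;> omega
      · have hs : PySem.List.sorted [(s1,(1:Int)),(s2,2),(s3,3)] (fun x => x.1) true
            = [(s1,1),(s2,2),(s3,3)] := by
          simp only [PySem.List.sorted, PySem.List.insertBy, List.foldl]
          split_ifs <;> simp only [PySem.List.insertBy] <;> try split_ifs
          all_goals try simp_all
          all_goals omega
        simp only [hs, hr]; clear hs
        simp [PySem.List.pyGetD, PySem.List.pyGet?, PySem.List.pyIdx?, List.foldl,
          PySem.List.enumerate, List.filter_cons, beq_iff_eq, max_def]
        split_ifs <;> simp [List.map] <;> omega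

-- ===== VERDICT (by name: the statement is the Claim_ definition above) =====
theorem solution_spec : Claim_equal_solution := by
  intro answers _
  unfold Spec_solution
  rw [pvSolutionA, pvSolutionB,
    pvHScore_eq answers [1,2,3,4,5] (by norm_num) (by norm_num),
    pvHScore_eq answers [2,1,2,3,2,4,2,5] (by norm_num) (by norm_num),
    pvHScore_eq answers [3,3,1,1,2,2,4,4,5,5] (by norm_num) (by norm_num),
    pvTail_eq]
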